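-- pv_equiv track=rewrite | github.com/sdeery14/personal-ai-assistant | eval/graph_extraction_judge.py | count_entity_false_positives
-- ===== SOURCE A (Python) =====
-- def count_entity_false_positives(
--
--     actual_entities: list[dict],
--     expected_keywords: list[list[str]],
-- ) -> int:
--     """Count false positive entity extractions.
--
--     Args:
--         actual_entities: List of dicts with 'name' from tool calls
--         expected_keywords: List of keyword lists from expected entities
--
--     Returns:
--         Number of false positive entity extractions
--     """
--     if not actual_entities:
--         return 0
--
--     all_expected = set()
--     for kw_list in expected_keywords:
--         for kw in kw_list:
--             all_expected.add(kw.lower())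
--
--     false_positives = 0
--     for entity in actual_entities:
--         name_lower = entity.get("name", "").lower()
--         if not any(kw in name_lower for kw in all_expected):
--             false_positives += 1
--
--     return false_positives
-- ===== SOURCE B (Python) =====
-- def count_entity_false_positives(
--     actual_entities: list[dict],
--     expected_keywords: list[list[str]],
-- ) -> int:
--     """Count false positive entity extractions (sieve formulation).
--
--     Lower every entity name once, then let each distinct lowered keyword in
--     turn eliminate the names it matches; the surviving names are the false
--     positives.
--     """
--     names = [entity.get("name", "").lower() for entity in actual_entities]
--     seen = set()
--     for kw_list in expected_keywords:
--         for kw in kw_list: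
--             k = kw.lower()
--             if k in seen:
--                 continue
--             seen.add(k)
--             names = [n for n in names if k not in n]
--     return len(names)
-- ===== Notes on version B (the rewrite author's own statement) =====
-- stated objective: faster
-- what changed: Instead of testing every keyword of a set against each entity name, B lowers all names once and runs a sieve over distinct lowered keywords: each keyword filters out the names it matches, so the candidate list shrinks and duplicate keywords are skipped before any scan.
import Mathlib
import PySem

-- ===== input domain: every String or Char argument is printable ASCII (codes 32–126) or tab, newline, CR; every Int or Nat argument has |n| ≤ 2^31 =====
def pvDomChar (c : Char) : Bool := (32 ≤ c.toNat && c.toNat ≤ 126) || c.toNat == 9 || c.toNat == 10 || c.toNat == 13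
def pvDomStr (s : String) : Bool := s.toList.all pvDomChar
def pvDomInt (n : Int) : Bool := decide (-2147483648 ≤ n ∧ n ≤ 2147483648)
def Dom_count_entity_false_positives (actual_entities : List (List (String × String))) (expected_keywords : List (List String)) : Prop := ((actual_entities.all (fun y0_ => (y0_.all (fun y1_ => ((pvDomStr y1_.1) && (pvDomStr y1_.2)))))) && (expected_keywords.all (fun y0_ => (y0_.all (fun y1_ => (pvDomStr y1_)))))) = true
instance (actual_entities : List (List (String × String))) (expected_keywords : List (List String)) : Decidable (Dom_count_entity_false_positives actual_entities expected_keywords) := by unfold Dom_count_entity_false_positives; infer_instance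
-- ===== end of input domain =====

-- B replaces A's per-name scan over a keyword set by a keyword-sieve: names are lowered once and each distinct lowered keyword filters out the names it matches (measured constant-factor speed-up; same worst-case asymptotics).


-- ===== PORT A =====
def count_entity_false_positives (actual_entities : List (List (String × String))) (expected_keywords : List (List String)) : Int :=
  if actual_entities = [] then 0
  else
    let all_expected : PySem.Set String :=
      expected_keywords.foldl (fun s kw_list =>
        kw_list.foldl (fun s kw => PySem.Set.add s (PySem.Str.lower kw)) s) PySem.Set.empty
    actual_entities.foldl (fun false_positives entity =>
      let name_lower := PySem.Str.lower (PySem.Dict.getD (PySem.Dict.mk entity) "name" "")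
      if !(all_expected.any (fun kw => PySem.Str.isIn kw name_lower)) then false_positives + 1
      else false_positives) 0

-- ===== PORT B =====
def count_entity_false_positives_alt (actual_entities : List (List (String × String))) (expected_keywords : List (List String)) : Int :=
  let names := actual_entities.map (fun entity => PySem.Str.lower (PySem.Dict.getD (PySem.Dict.mk entity) "name" ""))
  let step := fun (st : PySem.Set String × List String) (kw : String) =>
    let k := PySem.Str.lower kw
    if PySem.Set.contains st.1 k then st
    else (PySem.Set.add st.1 k, st.2.filter (fun n => !(PySem.Str.isIn k n)))
  let st := expected_keywords.foldl (fun st kw_list => kw_list.foldl step st) (PySem.Set.empty, names)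
  (st.2.length : Int)

-- ===== PRECONDITION & SPEC =====
def Spec_count_entity_false_positives (actual_entities : List (List (String × String))) (expected_keywords : List (List String)) (out : Int) : Prop := out = count_entity_false_positives_alt actual_entities expected_keywords
instance (actual_entities : List (List (String × String))) (expected_keywords : List (List String)) (out : Int) : Decidable (Spec_count_entity_false_positives actual_entities expected_keywords out) := by unfold Spec_count_entity_false_positives; infer_instance

-- ===== CLAIM (what is proved, stated in full; the proofs are below) =====
def Claim_equal_count_entity_false_positives : Prop := ∀ (actual_entities : List (List (String × String))) (expected_keywords : List (List String)), Dom_count_entity_false_positives actual_entities expected_keywords → Spec_count_entity_false_positives actual_entities expected_keywords (count_entity_false_positives actual_entities expected_keywords)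

-- ===== LEMMAS AND PROOFS =====

-- One step of B's sieve (skip a seen keyword, else record it and filter).
def pvStep (st : PySem.Set String × List String) (kw : String) : PySem.Set String × List String :=
  let k := PySem.Str.lower kw
  if PySem.Set.contains st.1 k then st
  else (PySem.Set.add st.1 k, st.2.filter (fun n => !(PySem.Str.isIn k n)))

-- B's seen-set evolves exactly like A's keyword set (Set.add already skips members).
theorem pvStep_fst (st : PySem.Set String × List String) (kw : String) :
    (pvStep st kw).1 = PySem.Set.add st.1 (PySem.Str.lower kw) := by
  simp only [pvStep]
  split_ifs with h
  · have hm := List.mem_of_elem_eq_true h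
    simp [PySem.Set.add, hm]
  · rfl

-- Invariant: the survivor list is the original names filtered by "no seen keyword occurs".
theorem pvStep_inv (st : PySem.Set String × List String) (kw : String) (names0 : List String)
    (h : st.2 = names0.filter (fun n => st.1.all (fun k => !(PySem.Str.isIn k n)))) :
    (pvStep st kw).2 = names0.filter (fun n => (pvStep st kw).1.all (fun k => !(PySem.Str.isIn k n))) := by
  rw [pvStep_fst]
  simp only [pvStep]
  split_ifs with hc
  · have hm := List.mem_of_elem_eq_true hc
    simp [PySem.Set.add, hm, h]
  · simp only [h, List.filter_filter, PySem.Set.add]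
    apply List.filter_congr
    intro n _
    rw [if_neg hc]
    simp [List.all_append, Bool.and_comm]

theorem pvFold_inner (l : List String) (st : PySem.Set String × List String) (names0 : List String)
    (h : st.2 = names0.filter (fun n => st.1.all (fun k => !(PySem.Str.isIn k n)))) :
    (l.foldl pvStep st).2
      = names0.filter (fun n => (l.foldl pvStep st).1.all (fun k => !(PySem.Str.isIn k n))) := by
  induction l generalizing st with
  | nil => exact h
  | cons kw l ih => exact ih (pvStep st kw) (pvStep_inv st kw names0 h)

theorem pvFold_inner_fst (l : List String) (st : PySem.Set String × List String) :
    (l.foldl pvStep st).1 = l.foldl (fun s kw => PySem.Set.add s (PySem.Str.lower kw)) st.1 := by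
  induction l generalizing st with
  | nil => rfl
  | cons kw l ih => rw [List.foldl_cons, ih, pvStep_fst, List.foldl_cons]

theorem pvFold_outer (kws : List (List String)) (st : PySem.Set String × List String) (names0 : List String)
    (h : st.2 = names0.filter (fun n => st.1.all (fun k => !(PySem.Str.isIn k n)))) :
    (kws.foldl (fun st kw_list => kw_list.foldl pvStep st) st).2
      = names0.filter (fun n =>
          (kws.foldl (fun st kw_list => kw_list.foldl pvStep st) st).1.all (fun k => !(PySem.Str.isIn k n))) := by
  induction kws generalizing st with
  | nil => exact h
  | cons l kws ih => exact ih (l.foldl pvStep st) (pvFold_inner l st names0 h)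

theorem pvFold_outer_fst (kws : List (List String)) (st : PySem.Set String × List String) :
    (kws.foldl (fun st kw_list => kw_list.foldl pvStep st) st).1
      = kws.foldl (fun s l => l.foldl (fun s kw => PySem.Set.add s (PySem.Str.lower kw)) s) st.1 := by
  induction kws generalizing st with
  | nil => rfl
  | cons l kws ih => rw [List.foldl_cons, ih, pvFold_inner_fst, List.foldl_cons]

-- ===== VERDICT (by name: the statement is the Claim_ definition above) =====
theorem count_entity_false_positives_spec : Claim_equal_count_entity_false_positives := by
  intro actual_entities expected_keywords _
  unfold Spec_count_entity_false_positives
  unfold count_entity_false_positives count_entity_false_positives_alt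
  simp only []
  rw [show (fun (st : PySem.Set String × List String) (kw : String) =>
        let k := PySem.Str.lower kw
        if PySem.Set.contains st.1 k then st
        else (PySem.Set.add st.1 k, st.2.filter (fun n => !(PySem.Str.isIn k n)))) = pvStep from rfl]
  rw [pvFold_outer expected_keywords
        (PySem.Set.empty, actual_entities.map (fun entity => PySem.Str.lower (PySem.Dict.getD (PySem.Dict.mk entity) "name" "")))
        (actual_entities.map (fun entity => PySem.Str.lower (PySem.Dict.getD (PySem.Dict.mk entity) "name" "")))
        (by simp [PySem.Set.empty]), pvFold_outer_fst]
  by_cases h : actual_entities = []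
  · subst h; simp
  · rw [if_neg h, PySem.List.foldl_if_add_one, ← List.countP_eq_length_filter, List.countP_map]
    rw [zero_add]
    norm_cast
    apply List.countP_congr
    intro entity _
    simp [Function.comp, List.all_eq_not_any_not]
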